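-- pv_equiv track=rewrite | github.com/Libre-SOC-mirrors/openpower-isa | src/openpower/decoder/isa/fastdctlee.py | halfrev
-- ===== SOURCE A (Python) =====
-- def halfrev(l, pre_rev=True):
--     n = len(l)
--     if n == 1:
--         return l
--     ll, lh = l[:n//2], l[n//2:]
--     if pre_rev:
--         ll, lh = halfrev(ll, pre_rev), halfrev(lh, pre_rev)
--     lh.reverse()
--     if not pre_rev:
--         ll, lh = halfrev(ll, pre_rev), halfrev(lh, pre_rev)
--     return ll + lh
-- ===== SOURCE B (Python) =====
-- def halfrev(l, pre_rev=True):
--     # Explicit-stack traversal over index segments with a "reversed" flag: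
--     # no list slicing, reversing or concatenation of the data.
--     n = len(l)
--     if n == 0:
--         return []
--     out = []
--     stack = [(0, n, False)]
--     while stack:
--         lo, hi, flip = stack.pop()
--         s = hi - lo
--         if s <= 1:
--             out.append(l[lo])
--             continue
--         m = s // 2
--         if not flip:
--             # same rule in both modes: low half plain, high half flagged
--             stack.append((lo + m, hi, True))
--             stack.append((lo, lo + m, False))
--         elif pre_rev:
--             # flag = output reversed: reverse(f(ll)++rev f(lh)) = f(lh) ++ rev f(ll)
--             stack.append((lo, lo + m, True))
--             stack.append((lo + m, hi, False))
--         else: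
--             # flag = data reversed: halves swap around the split point s - m
--             stack.append((lo, hi - m, False))
--             stack.append((hi - m, hi, True))
--     return out
-- ===== Notes on version B (the rewrite author's own statement) =====
-- stated objective: alternative
-- what changed: B replaces A's recursive slice/reverse/concatenate scheme by an explicit worklist of (lo, hi, flip) index segments with a 'reversed' flag and a single append-only output list, so no intermediate list is ever sliced, reversed or concatenated (intended as faster; measured around 1.5x at large sizes, borderline).
import Mathlib
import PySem

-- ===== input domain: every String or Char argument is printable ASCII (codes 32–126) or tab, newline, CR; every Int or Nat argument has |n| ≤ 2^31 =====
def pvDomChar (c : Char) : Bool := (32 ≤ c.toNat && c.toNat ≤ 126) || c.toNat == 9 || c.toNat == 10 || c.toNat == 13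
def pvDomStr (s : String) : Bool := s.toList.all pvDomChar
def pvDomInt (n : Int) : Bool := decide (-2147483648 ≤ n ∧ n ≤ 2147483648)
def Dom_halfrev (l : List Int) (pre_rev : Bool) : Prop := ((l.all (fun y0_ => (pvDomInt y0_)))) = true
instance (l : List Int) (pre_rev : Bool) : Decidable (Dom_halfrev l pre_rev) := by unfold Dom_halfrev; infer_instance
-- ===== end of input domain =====

-- B replaces A's slice/reverse/concat recursion by an explicit segment stack with a
-- "reversed" flag and a single append-only output list: no intermediate list is sliced,
-- reversed or concatenated (objective: alternative traversal; intended as faster, the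
-- timing run reads ~1.5x at large sizes, borderline).
-- A mutates only local slice copies; for n == 1 both return the list value unchanged.

-- ===== PORT A =====
-- On n = 0 Python A recurses forever (RecursionError); the fuel argument (enough for
-- A's recursion depth, see halfrevGo_congr) only makes the port total there — the empty
-- list is excluded by Pre_halfrev.
def halfrevGo (fuel : Nat) (l : List Int) (pre_rev : Bool) : List Int :=
  match fuel with
  | 0 => l
  | fuel + 1 =>
    if l.length ≤ 1 then l
    else
      let n := l.length
      let ll := l.take (n / 2)
      let lh := l.drop (n / 2)
      if pre_rev then
        halfrevGo fuel ll pre_rev ++ (halfrevGo fuel lh pre_rev).reverse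
      else
        halfrevGo fuel ll pre_rev ++ halfrevGo fuel lh.reverse pre_rev

def halfrev (l : List Int) (pre_rev : Bool) : List Int :=
  halfrevGo l.length l pre_rev

-- ===== PORT B =====
-- the while loop of Source B: stack of (lo, hi, flip) segments, accumulator `out`
-- (kept reversed, as Python appends; popping the Python stack = head of this list);
-- fuel only makes the loop total, it is never exhausted on the stacks Source B builds
def altGo (l : List Int) (pre : Bool) (fuel : Nat) :
    List (Nat × Nat × Bool) → List Int → List Int
  | [], out => out.reverse
  | (lo, hi, flip) :: rest, out =>
    match fuel with
    | 0 => out.reverse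
    | fuel + 1 =>
      if hi - lo ≤ 1 then
        -- out.append(l[lo]); l[lo] is in range on every stack Source B builds
        altGo l pre fuel rest (l.getD lo 0 :: out)
      else
        let m := (hi - lo) / 2
        let cs : List (Nat × Nat × Bool) :=
          if !flip then [(lo, lo + m, false), (lo + m, hi, true)]
          else if pre then [(lo + m, hi, false), (lo, lo + m, true)]
          else [(hi - m, hi, true), (lo, hi - m, false)]
        altGo l pre fuel (cs ++ rest) out

def halfrev_alt (l : List Int) (pre_rev : Bool) : List Int :=
  if l.length = 0 then []
  else altGo l pre_rev (2 * l.length + 1) [(0, l.length, false)] []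

-- ===== PRECONDITION & SPEC =====
-- Pre_ excludes only the empty list, on which Python A raises RecursionError.
def Pre_halfrev (l : List Int) (pre_rev : Bool) : Prop := l ≠ []
instance (l : List Int) (pre_rev : Bool) : Decidable (Pre_halfrev l pre_rev) := by
  unfold Pre_halfrev; infer_instance

def pvWitness_halfrev : List Int × Bool := ([3, 1, 4, 1, 5], true)

def Spec_halfrev (l : List Int) (pre_rev : Bool) (out : List Int) : Prop := out = halfrev_alt l pre_rev
instance (l : List Int) (pre_rev : Bool) (out : List Int) : Decidable (Spec_halfrev l pre_rev out) := by unfold Spec_halfrev; infer_instance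

-- ===== CLAIM (what is proved, stated in full; the proofs are below) =====
def Claim_equal_halfrev : Prop := ∀ (l : List Int) (pre_rev : Bool), Dom_halfrev l pre_rev → Pre_halfrev l pre_rev → Spec_halfrev l pre_rev (halfrev l pre_rev)

-- ===== LEMMAS AND PROOFS =====

-- the slice of l a segment denotes
def seg (l : List Int) (lo hi : Nat) : List Int := (l.drop lo).take (hi - lo)

-- intended output of one stack segment, phrased with A's function
def segOut (l : List Int) (pre : Bool) (t : Nat × Nat × Bool) : List Int :=
  match t with
  | (lo, hi, flip) =>
    if pre then
      (if flip then (halfrev (seg l lo hi) pre).reverse else halfrev (seg l lo hi) pre)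
    else
      halfrev (if flip then (seg l lo hi).reverse else seg l lo hi) pre

def Wf (l : List Int) (t : Nat × Nat × Bool) : Prop :=
  t.1 < t.2.1 ∧ t.2.1 ≤ l.length

-- A's recursion never needs more fuel than the list is long
theorem halfrevGo_congr (f1 : Nat) : ∀ (f2 : Nat) (l : List Int) (pre : Bool),
    l.length ≤ f1 → l.length ≤ f2 → halfrevGo f1 l pre = halfrevGo f2 l pre := by
  induction f1 with
  | zero =>
    intro f2 l pre h1 _
    have hl : l.length ≤ 1 := by omega
    cases f2 <;> simp only [halfrevGo] <;> rw [if_pos hl]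
  | succ f1 ih =>
    intro f2 l pre h1 h2
    cases f2 with
    | zero =>
      have hl : l.length ≤ 1 := by omega
      simp only [halfrevGo]; rw [if_pos hl]
    | succ f2 =>
      simp only [halfrevGo]
      by_cases hl : l.length ≤ 1
      · rw [if_pos hl, if_pos hl]
      · rw [if_neg hl, if_neg hl]
        have htl : (l.take (l.length / 2)).length ≤ f1 := by
          simp only [List.length_take]; omega
        have htl2 : (l.take (l.length / 2)).length ≤ f2 := by
          simp only [List.length_take]; omega
        have hdl : (l.drop (l.length / 2)).length ≤ f1 := by
          simp only [List.length_drop]; omega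
        have hdl2 : (l.drop (l.length / 2)).length ≤ f2 := by
          simp only [List.length_drop]; omega
        have hrl : (l.drop (l.length / 2)).reverse.length ≤ f1 := by
          simp only [List.length_reverse, List.length_drop]; omega
        have hrl2 : (l.drop (l.length / 2)).reverse.length ≤ f2 := by
          simp only [List.length_reverse, List.length_drop]; omega
        cases pre <;> simp only [Bool.false_eq_true, if_false, if_true]
        · rw [ih f2 _ _ htl htl2, ih f2 _ _ hrl hrl2]
        · rw [ih f2 _ _ htl htl2, ih f2 _ _ hdl hdl2]

theorem halfrev_small (l : List Int) (pre : Bool) (h : l.length ≤ 1) :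
    halfrev l pre = l := by
  rw [halfrev, halfrevGo_congr l.length (l.length + 1) l pre (le_refl _) (Nat.le_succ _)]
  simp only [halfrevGo]; rw [if_pos h]

theorem halfrev_big_t (l : List Int) (h : 2 ≤ l.length) :
    halfrev l true =
      halfrev (l.take (l.length / 2)) true ++ (halfrev (l.drop (l.length / 2)) true).reverse := by
  obtain ⟨k, hk⟩ : ∃ k, l.length = k + 1 := ⟨l.length - 1, by omega⟩
  rw [halfrev, hk]
  simp only [halfrevGo]
  rw [if_neg (by omega : ¬ l.length ≤ 1),
    halfrevGo_congr k (l.take (l.length / 2)).length _ true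
      (by simp only [List.length_take]; omega) (le_refl _),
    halfrevGo_congr k (l.drop (l.length / 2)).length _ true
      (by simp only [List.length_drop]; omega) (le_refl _)]
  simp only [reduceIte, halfrev, ← hk]

theorem halfrev_big_f (l : List Int) (h : 2 ≤ l.length) :
    halfrev l false =
      halfrev (l.take (l.length / 2)) false ++ halfrev (l.drop (l.length / 2)).reverse false := by
  obtain ⟨k, hk⟩ : ∃ k, l.length = k + 1 := ⟨l.length - 1, by omega⟩
  rw [halfrev, hk]
  simp only [halfrevGo]
  rw [if_neg (by omega : ¬ l.length ≤ 1),
    halfrevGo_congr k (l.take (l.length / 2)).length _ false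
      (by simp only [List.length_take]; omega) (le_refl _),
    halfrevGo_congr k (l.drop (l.length / 2)).reverse.length _ false
      (by simp only [List.length_reverse, List.length_drop]; omega) (le_refl _)]
  simp only [Bool.false_eq_true, reduceIte, halfrev, ← hk]

theorem seg_length (l : List Int) (lo hi : Nat) (_h1 : lo ≤ hi) (h2 : hi ≤ l.length) :
    (seg l lo hi).length = hi - lo := by
  simp [seg]; omega

theorem seg_take (l : List Int) (lo hi m : Nat) (hm : m ≤ hi - lo) :
    (seg l lo hi).take m = seg l lo (lo + m) := by
  unfold seg
  rw [List.take_take, show lo + m - lo = m from by omega, show min m (hi - lo) = m from by omega]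

theorem seg_drop (l : List Int) (lo hi m : Nat) :
    (seg l lo hi).drop m = seg l (lo + m) hi := by
  unfold seg
  rw [List.drop_take, List.drop_drop, show hi - lo - m = hi - (lo + m) from by omega]

theorem seg_singleton (l : List Int) (lo : Nat) (h : lo < l.length) :
    seg l lo (lo + 1) = [l.getD lo 0] := by
  unfold seg
  rw [show lo + 1 - lo = 1 from by omega, List.drop_eq_getElem_cons h,
    List.getD_eq_getElem l 0 h, List.take_succ_cons, List.take_zero]

theorem segOut_singleton (l : List Int) (pre : Bool) (lo hi : Nat) (flip : Bool)
    (hlo : lo < hi) (hhi : hi ≤ l.length) (hle : hi - lo ≤ 1) :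
    segOut l pre (lo, hi, flip) = [l.getD lo 0] := by
  have hh : hi = lo + 1 := by omega
  subst hh
  rw [segOut, seg_singleton l lo (by omega)]
  have hs : halfrev [l.getD lo 0] pre = [l.getD lo 0] := halfrev_small _ _ (by simp)
  cases pre <;> cases flip <;>
    simp only [Bool.false_eq_true, if_false, if_true, List.reverse_singleton, hs]

theorem segOut_split (l : List Int) (pre : Bool) (lo hi : Nat) (flip : Bool)
    (hlo : lo < hi) (hhi : hi ≤ l.length) (h2 : 2 ≤ hi - lo) :
    segOut l pre (lo, hi, flip) =
      (((if !flip then [(lo, lo + (hi - lo) / 2, false), (lo + (hi - lo) / 2, hi, true)]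
        else if pre then [(lo + (hi - lo) / 2, hi, false), (lo, lo + (hi - lo) / 2, true)]
        else [(hi - (hi - lo) / 2, hi, true), (lo, hi - (hi - lo) / 2, false)]) :
        List (Nat × Nat × Bool)).flatMap (segOut l pre)) := by
  have hlen : (seg l lo hi).length = hi - lo := seg_length l lo hi (by omega) hhi
  have htake : (seg l lo hi).take ((hi - lo) / 2) = seg l lo (lo + (hi - lo) / 2) :=
    seg_take l lo hi _ (Nat.div_le_self _ _)
  have hdrop : (seg l lo hi).drop ((hi - lo) / 2) = seg l (lo + (hi - lo) / 2) hi :=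
    seg_drop l lo hi _
  have hrtake : (seg l lo hi).reverse.take ((hi - lo) / 2)
      = (seg l (hi - (hi - lo) / 2) hi).reverse := by
    rw [List.take_reverse, hlen, seg_drop,
      show lo + (hi - lo - (hi - lo) / 2) = hi - (hi - lo) / 2 from by omega]
  have hrdrop : (seg l lo hi).reverse.drop ((hi - lo) / 2)
      = (seg l lo (hi - (hi - lo) / 2)).reverse := by
    rw [List.drop_reverse, hlen, seg_take l lo hi _ (by omega),
      show lo + (hi - lo - (hi - lo) / 2) = hi - (hi - lo) / 2 from by omega]
  cases pre <;> cases flip <;>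
    simp only [segOut, Bool.not_false, Bool.not_true, Bool.false_eq_true, if_false, if_true,
      List.flatMap_cons, List.flatMap_nil, List.append_nil]
  · -- pre = false, flip = false
    rw [halfrev_big_f (seg l lo hi) (by omega), hlen, htake, hdrop]
  · -- pre = false, flip = true : the data-reversed slice splits around hi - (hi-lo)/2
    rw [halfrev_big_f (seg l lo hi).reverse (by rw [List.length_reverse, hlen]; omega),
      List.length_reverse, hlen, hrtake, hrdrop, List.reverse_reverse]
  · -- pre = true, flip = false
    rw [halfrev_big_t (seg l lo hi) (by omega), hlen, htake, hdrop]
  · -- pre = true, flip = true : reverse of the concatenation swaps and re-flags the halves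
    rw [halfrev_big_t (seg l lo hi) (by omega), hlen, htake, hdrop,
      List.reverse_append, List.reverse_reverse]

-- weight of one stack segment; its stack sum bounds the remaining while iterations
def segW (t : Nat × Nat × Bool) : Nat :=
  if t.2.1 - t.1 = 0 then 1 else 2 * (t.2.1 - t.1) - 1

theorem segW_pos (t : Nat × Nat × Bool) : 1 ≤ segW t := by
  rw [segW]; split <;> omega

theorem segW_split (lo hi : Nat) (flip pre : Bool)
    (cs : List (Nat × Nat × Bool)) (h : ¬ hi - lo ≤ 1)
    (hcs : cs = if !flip then [(lo, lo + (hi - lo) / 2, false), (lo + (hi - lo) / 2, hi, true)]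
      else if pre = true then [(lo + (hi - lo) / 2, hi, false), (lo, lo + (hi - lo) / 2, true)]
      else [(hi - (hi - lo) / 2, hi, true), (lo, hi - (hi - lo) / 2, false)]) :
    (cs.map segW).sum < segW (lo, hi, flip) := by
  subst hcs
  split <;> [skip; split] <;>
    simp only [List.map_cons, List.map_nil, List.sum_cons, List.sum_nil, segW] <;>
    split <;> split <;> split <;> omega

theorem altGo_inv (l : List Int) (pre : Bool) (fuel : Nat) :
    ∀ (stack : List (Nat × Nat × Bool)) (out : List Int),
    (stack.map segW).sum ≤ fuel → (∀ t ∈ stack, Wf l t) →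
    altGo l pre fuel stack out = out.reverse ++ stack.flatMap (segOut l pre) := by
  induction fuel with
  | zero =>
    intro stack out hfu _
    cases stack with
    | nil => simp [altGo]
    | cons t rest =>
      exfalso
      have := segW_pos t
      simp only [List.map_cons, List.sum_cons] at hfu
      omega
  | succ fuel ih =>
    intro stack out hfu hwf
    cases stack with
    | nil => simp [altGo]
    | cons t rest =>
      obtain ⟨lo, hi, flip⟩ := t
      have hwf0 : Wf l (lo, hi, flip) := hwf _ (by simp)
      simp only [List.map_cons, List.sum_cons] at hfu
      by_cases hle : hi - lo ≤ 1
      · simp only [altGo, if_pos hle]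
        rw [ih rest _ (by have := segW_pos (lo, hi, flip); omega)
            (fun t ht => hwf t (by simp [ht])),
          List.flatMap_cons,
          segOut_singleton l pre lo hi flip hwf0.1 hwf0.2 hle]
        simp
      · simp only [altGo, if_neg hle]
        have h1 : lo < hi := hwf0.1
        have h2 : hi ≤ l.length := hwf0.2
        set cs : List (Nat × Nat × Bool) :=
          if !flip then [(lo, lo + (hi - lo) / 2, false), (lo + (hi - lo) / 2, hi, true)]
          else if pre then [(lo + (hi - lo) / 2, hi, false), (lo, lo + (hi - lo) / 2, true)]
          else [(hi - (hi - lo) / 2, hi, true), (lo, hi - (hi - lo) / 2, false)] with hcs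
        have hsum : (cs.map segW).sum < segW (lo, hi, flip) :=
          segW_split lo hi flip pre cs hle hcs
        have hcsw : ∀ t ∈ cs, Wf l t := by
          rw [hcs]
          split <;> [skip; split] <;> intro t ht <;>
            simp only [List.mem_cons, List.not_mem_nil, or_false] at ht <;>
            rcases ht with h | h <;> subst h <;>
            exact ⟨by simp; omega, by simp; omega⟩
        have hall : ∀ t ∈ cs ++ rest, Wf l t := by
          intro t ht
          rcases List.mem_append.mp ht with h | h
          · exact hcsw t h
          · exact hwf t (by simp [h])
        rw [ih (cs ++ rest) out
            (by simp only [List.map_append, List.sum_append]; omega) hall,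
          List.flatMap_append, List.flatMap_cons,
          segOut_split l pre lo hi flip hwf0.1 hwf0.2 (by omega)]

-- ===== VERDICT (by name: the statement is the Claim_ definition above) =====
theorem halfrev_spec : Claim_equal_halfrev := by
  intro l pre _ hpre
  unfold Spec_halfrev halfrev_alt
  have hlen : l.length ≠ 0 := by
    intro h; exact hpre (List.eq_nil_of_length_eq_zero h)
  rw [if_neg hlen,
    altGo_inv l pre (2 * l.length + 1) [(0, l.length, false)] []
      (by simp only [List.map_cons, List.map_nil, List.sum_cons, List.sum_nil, segW]
          split <;> omega)
      (by intro t ht; simp only [List.mem_singleton] at ht; subst ht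
          exact ⟨show 0 < l.length from by omega, show l.length ≤ l.length from le_refl _⟩)]
  have hseg : seg l 0 l.length = l := by simp [seg]
  cases pre <;> simp [segOut, hseg]
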